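-- pv_equiv track=rewrite | github.com/az4521/TC4-1.12.2 | scripts/s2_gl11.py | _apply_simple_renames
-- ===== SOURCE A (Python) =====
-- SIMPLE_RENAMES = [
--     ("GL11.glPushMatrix()",     "GlStateManager.pushMatrix()"),
--     ("GL11.glPopMatrix()",      "GlStateManager.popMatrix()"),
--     ("GL11.glTranslatef(",      "GlStateManager.translate("),
--     ("GL11.glTranslated(",      "GlStateManager.translate("),
--     ("GL11.glRotatef(",         "GlStateManager.rotate("),
--     ("GL11.glRotated(",         "GlStateManager.rotate("),
--     ("GL11.glScalef(",          "GlStateManager.scale("),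
--     ("GL11.glScaled(",          "GlStateManager.scale("),
--     ("GL11.glColor4f(",         "GlStateManager.color("),
--     ("GL11.glColor3f(",         "GlStateManager.color("),
--     ("GL11.glDepthMask(",       "GlStateManager.depthMask("),
--     ("GL11.glBlendFunc(",       "GlStateManager.blendFunc("),
--     ("GL11.glAlphaFunc(",       "GlStateManager.alphaFunc("),
--     ("GL11.glClearColor(",      "GlStateManager.clearColor("),
--     ("GL11.glClear(",           "GlStateManager.clear("),
--     ("GL11.glShadeModel(",      "GlStateManager.shadeModel("),
--     ("GL11.glColorMask(",       "GlStateManager.colorMask("),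
--     ("GL11.glBindTexture(GL11.GL_TEXTURE_2D, ", "GlStateManager.bindTexture("),
--     ("GL11.glBindTexture(",     "GlStateManager.bindTexture("),  # fallback
-- ]
--
-- def _apply_simple_renames(text: str) -> tuple[str, int]:
--     changes = 0
--     for old, new in SIMPLE_RENAMES:
--         count = text.count(old)
--         if count:
--             text = text.replace(old, new)
--             changes += count
--     return text, changes
-- ===== SOURCE B (Python) =====
-- import re
--
-- SIMPLE_RENAMES = [
--     ("GL11.glPushMatrix()",     "GlStateManager.pushMatrix()"),
--     ("GL11.glPopMatrix()",      "GlStateManager.popMatrix()"),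
--     ("GL11.glTranslatef(",      "GlStateManager.translate("),
--     ("GL11.glTranslated(",      "GlStateManager.translate("),
--     ("GL11.glRotatef(",         "GlStateManager.rotate("),
--     ("GL11.glRotated(",         "GlStateManager.rotate("),
--     ("GL11.glScalef(",          "GlStateManager.scale("),
--     ("GL11.glScaled(",          "GlStateManager.scale("),
--     ("GL11.glColor4f(",         "GlStateManager.color("),
--     ("GL11.glColor3f(",         "GlStateManager.color("),
--     ("GL11.glDepthMask(",       "GlStateManager.depthMask("),
--     ("GL11.glBlendFunc(",       "GlStateManager.blendFunc("),
--     ("GL11.glAlphaFunc(",       "GlStateManager.alphaFunc("),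
--     ("GL11.glClearColor(",      "GlStateManager.clearColor("),
--     ("GL11.glClear(",           "GlStateManager.clear("),
--     ("GL11.glShadeModel(",      "GlStateManager.shadeModel("),
--     ("GL11.glColorMask(",       "GlStateManager.colorMask("),
--     ("GL11.glBindTexture(GL11.GL_TEXTURE_2D, ", "GlStateManager.bindTexture("),
--     ("GL11.glBindTexture(",     "GlStateManager.bindTexture("),  # fallback
-- ]
--
-- # One combined scan: alternation in SIMPLE_RENAMES order, so the GL_TEXTURE_2D
-- # special case wins over the bindTexture fallback exactly as in the pass order.
-- _RENAME_MAP = dict(SIMPLE_RENAMES)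
-- _RENAME_RE = re.compile("|".join(re.escape(old) for old, _ in SIMPLE_RENAMES))
--
-- def _apply_simple_renames(text: str) -> tuple[str, int]:
--     return _RENAME_RE.subn(lambda m: _RENAME_MAP[m.group(0)], text)
-- ===== Notes on version B (the rewrite author's own statement) =====
-- stated objective: faster
-- what changed: A makes 19 sequential count+replace passes over the text (one per rename); B compiles the rename table once into a single alternation regex (alternatives in table order, so the GL_TEXTURE_2D special case still beats the bindTexture fallback) and rewrites the text in one combined scan with re.subn, returning subn's substitution count.
import Mathlib
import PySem

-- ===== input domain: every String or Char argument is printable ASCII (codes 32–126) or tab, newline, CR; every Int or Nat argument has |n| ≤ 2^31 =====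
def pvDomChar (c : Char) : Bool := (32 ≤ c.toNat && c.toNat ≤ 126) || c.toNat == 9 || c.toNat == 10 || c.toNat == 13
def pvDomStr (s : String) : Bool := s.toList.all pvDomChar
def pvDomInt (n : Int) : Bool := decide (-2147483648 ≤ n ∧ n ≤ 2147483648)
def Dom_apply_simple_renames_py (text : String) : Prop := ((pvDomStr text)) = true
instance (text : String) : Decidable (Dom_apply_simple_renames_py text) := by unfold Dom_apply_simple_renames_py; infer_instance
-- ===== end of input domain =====

-- B replaces A's 19 sequential count+replace passes by ONE left-to-right scan (a compiled
-- alternation regex in Python); same return value, proved equal for every string.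

-- ===== PORT A =====
-- SIMPLE_RENAMES (module constant used by A)
def pvRenames : List (String × String) := [
  ("GL11.glPushMatrix()",     "GlStateManager.pushMatrix()"),
  ("GL11.glPopMatrix()",      "GlStateManager.popMatrix()"),
  ("GL11.glTranslatef(",      "GlStateManager.translate("),
  ("GL11.glTranslated(",      "GlStateManager.translate("),
  ("GL11.glRotatef(",         "GlStateManager.rotate("),
  ("GL11.glRotated(",         "GlStateManager.rotate("),
  ("GL11.glScalef(",          "GlStateManager.scale("),
  ("GL11.glScaled(",          "GlStateManager.scale("),
  ("GL11.glColor4f(",         "GlStateManager.color("),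
  ("GL11.glColor3f(",         "GlStateManager.color("),
  ("GL11.glDepthMask(",       "GlStateManager.depthMask("),
  ("GL11.glBlendFunc(",       "GlStateManager.blendFunc("),
  ("GL11.glAlphaFunc(",       "GlStateManager.alphaFunc("),
  ("GL11.glClearColor(",      "GlStateManager.clearColor("),
  ("GL11.glClear(",           "GlStateManager.clear("),
  ("GL11.glShadeModel(",      "GlStateManager.shadeModel("),
  ("GL11.glColorMask(",       "GlStateManager.colorMask("),
  ("GL11.glBindTexture(GL11.GL_TEXTURE_2D, ", "GlStateManager.bindTexture("),
  ("GL11.glBindTexture(",     "GlStateManager.bindTexture(")]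

-- loop body of A: count = text.count(old); if count: text = text.replace(old, new); changes += count
def pvStepA (st : String × Int) (p : String × String) : String × Int :=
  let count : Nat := PySem.Str.count st.1 p.1
  if count ≠ 0 then (PySem.Str.replace st.1 p.1 p.2, st.2 + (count : Int)) else st

def apply_simple_renames_py (text : String) : String × Int :=
  pvRenames.foldl pvStepA (text, 0)

-- ===== PORT B =====
-- B compiles SIMPLE_RENAMES into one alternation table (escaped literals, same order);
-- pvPats is that table on code points.
def pvPats : List (List Char × List Char) := pvRenames.map (fun p => (p.1.toList, p.2.toList))

-- the regex engine's literal-alternation semantics, ported by hand (exact for a regex that is an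
-- alternation of escaped literals): at each position try the alternatives in order; on a match
-- emit the mapped replacement, skip the match, count it; else copy one char.
def pvTryFirst (ps : List (List Char × List Char)) (cs : List Char) :
    Option (List Char × List Char) :=
  match ps with
  | [] => none
  | (o, n) :: rs => if o.isPrefixOf cs then some (o, n) else pvTryFirst rs cs

def pvScanGo (ps : List (List Char × List Char)) : Nat → List Char → List Char × Nat
  | 0, l => (l, 0)
  | _ + 1, [] => ([], 0)
  | fuel + 1, c :: t =>
    match pvTryFirst ps (c :: t) with
    | some (o, n) =>
      let r := pvScanGo ps fuel ((c :: t).drop o.length)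
      (n ++ r.1, r.2 + 1)
    | none =>
      let r := pvScanGo ps fuel t
      (c :: r.1, r.2)

def apply_simple_renames_py_alt (text : String) : String × Int :=
  let r := pvScanGo pvPats text.toList.length text.toList
  (String.ofList r.1, (r.2 : Int))

-- ===== PRECONDITION & SPEC =====
def Spec_apply_simple_renames_py (text : String) (out : String × Int) : Prop := out = apply_simple_renames_py_alt text
instance (text : String) (out : String × Int) : Decidable (Spec_apply_simple_renames_py text out) := by unfold Spec_apply_simple_renames_py; infer_instance

-- ===== CLAIM (what is proved, stated in full; the proofs are below) =====
def Claim_equal_apply_simple_renames_py : Prop := ∀ (text : String), Dom_apply_simple_renames_py text → Spec_apply_simple_renames_py text (apply_simple_renames_py text)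

-- ===== LEMMAS AND PROOFS =====

-- structural (fuel-free) versions of Python's str.replace / str.count for a fixed pattern
def pvRepl (o n : List Char) : List Char → List Char
  | [] => []
  | c :: t =>
    if h : o.isPrefixOf (c :: t) ∧ o ≠ [] then n ++ pvRepl o n ((c :: t).drop o.length)
    else c :: pvRepl o n t
termination_by l => l.length
decreasing_by
  · have : 0 < o.length := List.length_pos_iff.mpr h.2
    simp [List.length_drop]; omega
  · simp

def pvCnt (o : List Char) : List Char → Nat
  | [] => 0
  | c :: t =>
    if h : o.isPrefixOf (c :: t) ∧ o ≠ [] then pvCnt o ((c :: t).drop o.length) + 1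
    else pvCnt o t
termination_by l => l.length
decreasing_by
  · have : 0 < o.length := List.length_pos_iff.mpr h.2
    simp [List.length_drop]; omega
  · simp

-- A's pass structure: apply the renames one after the other, each over the whole string
def pvSeq : List (List Char × List Char) → List Char → List Char × Nat
  | [], l => (l, 0)
  | (o, n) :: rs, l =>
    let r := pvSeq rs (pvRepl o n l)
    (r.1, pvCnt o l + r.2)

-- scan with exactly enough fuel
def pvScanL (ps : List (List Char × List Char)) (l : List Char) : List Char × Nat :=
  pvScanGo ps l.length l

-- interference-freedom conditions on the concrete table ---------------------------------
-- pattern o' cannot start inside replacement n, and n cannot sit strictly inside o'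
def pvPairOK (o' n : List Char) : Prop :=
  (∀ i, i < n.length → ¬ (n.drop i <+: o') ∧ ¬ (o' <+: n.drop i)) ∧
  (∀ j, j < o'.length → 0 < j → ¬ (o'.drop j <+: n) ∧ ¬ (n <+: o'.drop j))

-- conditions a head rename (o, n) needs against the later renames rs
def pvHeadOK (o n : List Char) (rs : List (List Char × List Char)) : Prop :=
  o ≠ [] ∧ ∀ p ∈ rs, p.1 ≠ [] ∧ pvPairOK p.1 n ∧
    (∀ i, i < p.1.length → 0 < i → ¬ (p.1.drop i <+: o) ∧ ¬ (o <+: p.1.drop i))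

-- every suffix of the table satisfies pvHeadOK against the renames after it
def pvChainOK (ps : List (List Char × List Char)) : Prop :=
  ∀ i, i < ps.length → pvHeadOK (ps.getD i ([], [])).1 (ps.getD i ([], [])).2 (ps.drop (i + 1))

theorem pvChainOK_pats : pvChainOK pvPats := by
  intro i hi
  unfold pvHeadOK pvPairOK
  have h19 : pvPats.length = 19 := rfl
  rw [h19] at hi
  interval_cases i <;> decide

theorem pvChainOK_cons {p : List Char × List Char} {rs : List (List Char × List Char)}
    (h : pvChainOK (p :: rs)) : pvHeadOK p.1 p.2 rs ∧ pvChainOK rs := by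
  constructor
  · exact h 0 (Nat.succ_pos _)
  · intro i hi
    exact h (i + 1) (by simpa using hi)

-- basic prefix facts --------------------------------------------------------------------
theorem pvPrefix_append_cases {a b z : List Char} (h : a <+: b ++ z) : a <+: b ∨ b <+: a :=
  List.prefix_or_prefix_of_prefix h (List.prefix_append b z)

-- bridges: PySem go-loops = structural versions -----------------------------------------
theorem pvReplace_go_eq (o n : List Char) (ho : o ≠ []) :
    ∀ fuel l acc, l.length ≤ fuel →
      PySem.Chars.replace.go o n fuel l acc = acc.reverse ++ pvRepl o n l := by
  intro fuel
  induction fuel with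
  | zero =>
    intro l acc hl
    have : l = [] := List.length_eq_zero_iff.mp (Nat.le_zero.mp hl)
    subst this
    simp [PySem.Chars.replace.go, pvRepl]
  | succ fuel ih =>
    intro l acc hl
    match l with
    | [] => simp [PySem.Chars.replace.go, pvRepl]
    | c :: t =>
      by_cases hp : o.isPrefixOf (c :: t)
      · have hlen : ((c :: t).drop o.length).length ≤ fuel := by
          have : 0 < o.length := List.length_pos_iff.mpr ho
          simp only [List.length_drop, List.length_cons] at *
          omega
        rw [PySem.Chars.replace.go, if_pos hp, ih _ _ hlen, pvRepl, dif_pos ⟨hp, ho⟩]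
        simp
      · have hlen : t.length ≤ fuel := by
          simp only [List.length_cons] at hl; omega
        rw [PySem.Chars.replace.go, if_neg hp, ih _ _ hlen, pvRepl,
          dif_neg (fun hc => hp hc.1)]
        simp

theorem pvReplace_eq (o n l : List Char) (ho : o ≠ []) :
    PySem.Chars.replace l o n = pvRepl o n l := by
  have hie : o.isEmpty = false := by simpa [List.isEmpty_iff] using ho
  rw [PySem.Chars.replace, hie]
  simpa using pvReplace_go_eq o n ho l.length l [] (le_refl _)

theorem pvCount_go_eq (o : List Char) (ho : o ≠ []) :
    ∀ fuel l acc, l.length ≤ fuel →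
      PySem.Chars.count.go o fuel l acc = acc + pvCnt o l := by
  intro fuel
  induction fuel with
  | zero =>
    intro l acc hl
    have : l = [] := List.length_eq_zero_iff.mp (Nat.le_zero.mp hl)
    subst this
    simp [PySem.Chars.count.go, pvCnt]
  | succ fuel ih =>
    intro l acc hl
    match l with
    | [] => simp [PySem.Chars.count.go, pvCnt]
    | c :: t =>
      by_cases hp : o.isPrefixOf (c :: t)
      · have hlen : ((c :: t).drop o.length).length ≤ fuel := by
          have : 0 < o.length := List.length_pos_iff.mpr ho
          simp only [List.length_drop, List.length_cons] at *
          omega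
        rw [PySem.Chars.count.go, if_pos hp, ih _ _ hlen, pvCnt, dif_pos ⟨hp, ho⟩]
        omega
      · have hlen : t.length ≤ fuel := by
          simp only [List.length_cons] at hl; omega
        rw [PySem.Chars.count.go, if_neg hp, ih _ _ hlen, pvCnt,
          dif_neg (fun hc => hp hc.1)]

theorem pvCount_eq (o l : List Char) (ho : o ≠ []) :
    PySem.Chars.count l o = pvCnt o l := by
  have hie : o.isEmpty = false := by simpa [List.isEmpty_iff] using ho
  rw [PySem.Chars.count, hie]
  simpa using pvCount_go_eq o ho l.length l 0 (le_refl _)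

theorem pvRepl_of_cnt_zero (o n : List Char) :
    ∀ l, pvCnt o l = 0 → pvRepl o n l = l := by
  intro l
  fun_induction pvCnt o l with
  | case1 => intro _; simp [pvRepl]
  | case2 c t h ih => intro hc; omega
  | case3 c t h ih =>
    intro hc
    rw [pvRepl, dif_neg h, ih hc]

-- A's foldl = pvSeq ---------------------------------------------------------------------
theorem pvFoldlA (ps : List (String × String)) (hne : ∀ p ∈ ps, p.1 ≠ "") :
    ∀ (s : String) (k : Int),
      ps.foldl pvStepA (s, k)
      = (String.ofList (pvSeq (ps.map (fun p => (p.1.toList, p.2.toList))) s.toList).1,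
         k + ((pvSeq (ps.map (fun p => (p.1.toList, p.2.toList))) s.toList).2 : Int)) := by
  induction ps with
  | nil =>
    intro s k
    simp [pvSeq, String.ofList_toList]
  | cons p ps ih =>
    intro s k
    have hop : p.1.toList ≠ [] := by
      intro hc
      exact hne p (List.mem_cons_self) (by
        have := congrArg String.ofList hc
        simpa [String.ofList_toList] using this)
    have hps : ∀ q ∈ ps, q.1 ≠ "" := fun q hq => hne q (List.mem_cons_of_mem _ hq)
    have hcnt : PySem.Str.count s p.1 = pvCnt p.1.toList s.toList := by
      rw [PySem.Str.count_eq, pvCount_eq _ _ hop]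
    have hrep : (PySem.Str.replace s p.1 p.2).toList
        = pvRepl p.1.toList p.2.toList s.toList := by
      rw [PySem.Str.toList_replace, pvReplace_eq _ _ _ hop]
    rw [List.foldl_cons]
    by_cases hz : PySem.Str.count s p.1 ≠ 0
    · have hstep : pvStepA (s, k) p = (PySem.Str.replace s p.1 p.2, k + (PySem.Str.count s p.1 : Int)) := by
        simp only [pvStepA]
        rw [if_pos hz]
      rw [hstep, ih hps (PySem.Str.replace s p.1 p.2) (k + (PySem.Str.count s p.1 : Int))]
      simp only [List.map_cons, pvSeq, hrep, hcnt]
      rw [Prod.mk.injEq]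
      exact ⟨rfl, by push_cast; ring⟩
    · push_neg at hz
      have hstep : pvStepA (s, k) p = (s, k) := by
        simp only [pvStepA]
        rw [if_neg (fun hc => hc hz)]
      have hrep0 : pvRepl p.1.toList p.2.toList s.toList = s.toList :=
        pvRepl_of_cnt_zero _ _ _ (by rw [← hcnt]; exact hz)
      rw [hstep, ih hps s k]
      simp only [List.map_cons, pvSeq, hrep0]
      rw [← hcnt, hz]
      simp

-- pvScanL equations ---------------------------------------------------------------------
theorem pvTryFirst_mem {ps : List (List Char × List Char)} {cs : List Char}
    {p : List Char × List Char} (h : pvTryFirst ps cs = some p) :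
    p ∈ ps ∧ p.1 <+: cs := by
  induction ps with
  | nil => cases h
  | cons q rs ih =>
    rcases q with ⟨o, n⟩
    by_cases hp : o.isPrefixOf cs
    · rw [pvTryFirst, if_pos hp] at h
      cases h
      exact ⟨List.mem_cons_self, (PySem.Chars.startswith_iff cs o).mp hp⟩
    · rw [pvTryFirst, if_neg hp] at h
      exact ⟨List.mem_cons_of_mem _ (ih h).1, (ih h).2⟩

theorem pvTryFirst_none_iff {ps : List (List Char × List Char)} {cs : List Char} :
    pvTryFirst ps cs = none ↔ ∀ p ∈ ps, ¬ p.1 <+: cs := by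
  induction ps with
  | nil => exact iff_of_true rfl (by simp)
  | cons q rs ih =>
    rcases q with ⟨o, n⟩
    by_cases hp : o.isPrefixOf cs
    · rw [pvTryFirst, if_pos hp]
      simp only [false_iff, reduceCtorEq]
      intro hall
      exact hall (o, n) List.mem_cons_self ((PySem.Chars.startswith_iff cs o).mp hp)
    · rw [pvTryFirst, if_neg hp]
      rw [ih]
      constructor
      · intro hall p hpmem
        rcases List.mem_cons.mp hpmem with rfl | hpm
        · intro hc
          exact hp ((PySem.Chars.startswith_iff cs o).mpr hc)
        · exact hall p hpm
      · intro hall p hpm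
        exact hall p (List.mem_cons_of_mem _ hpm)

theorem pvScanGo_fuel {ps : List (List Char × List Char)} (hne : ∀ p ∈ ps, p.1 ≠ []) :
    ∀ fuel l, l.length ≤ fuel → pvScanGo ps fuel l = pvScanL ps l := by
  intro fuel
  induction fuel using Nat.strong_induction_on with
  | _ fuel ih =>
    intro l hl
    match fuel, l with
    | 0, l =>
      have : l = [] := List.length_eq_zero_iff.mp (Nat.le_zero.mp hl)
      subst this
      rfl
    | fuel + 1, [] => rfl
    | fuel + 1, c :: t =>
      unfold pvScanL
      simp only [List.length_cons]
      rw [pvScanGo, pvScanGo]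
      cases htf : pvTryFirst ps (c :: t) with
      | none =>
        have h1 : pvScanGo ps fuel t = pvScanL ps t :=
          ih fuel (Nat.lt_succ_self _) t (by simpa using Nat.lt_succ_iff.mp (Nat.lt_of_lt_of_le (Nat.lt_succ_self _) hl))
        have h2 : pvScanGo ps t.length t = pvScanL ps t := rfl
        dsimp only
        rw [h1, h2]
      | some p =>
        rcases p with ⟨o, n⟩
        have hmem := pvTryFirst_mem htf
        have holen : 0 < o.length := List.length_pos_iff.mpr (hne _ hmem.1)
        have hdl : ((c :: t).drop o.length).length ≤ t.length := by
          simp only [List.length_drop, List.length_cons]; omega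
        have hl' : t.length ≤ fuel := by simpa using hl
        have h1 : pvScanGo ps fuel ((c :: t).drop o.length) = pvScanL ps ((c :: t).drop o.length) :=
          ih fuel (Nat.lt_succ_self _) _ (le_trans hdl hl')
        have h2 : pvScanGo ps t.length ((c :: t).drop o.length) = pvScanL ps ((c :: t).drop o.length) :=
          ih t.length (Nat.lt_succ_of_le hl') _ hdl
        dsimp only
        rw [h1, h2]

theorem pvScanL_match {ps : List (List Char × List Char)} (hne : ∀ p ∈ ps, p.1 ≠ [])
    {l : List Char} {o n : List Char} (hl : l ≠ [])
    (h : pvTryFirst ps l = some (o, n)) :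
    pvScanL ps l =
      (n ++ (pvScanL ps (l.drop o.length)).1, (pvScanL ps (l.drop o.length)).2 + 1) := by
  match l with
  | [] => exact absurd rfl hl
  | c :: t =>
    have hmem := pvTryFirst_mem h
    have holen : 0 < o.length := List.length_pos_iff.mpr (hne _ hmem.1)
    unfold pvScanL
    simp only [List.length_cons]
    rw [pvScanGo, h]
    dsimp only
    rw [pvScanGo_fuel hne t.length ((c :: t).drop o.length)
      (by simp only [List.length_drop, List.length_cons]; omega)]
    rfl

theorem pvScanL_skip {ps : List (List Char × List Char)} (hne : ∀ p ∈ ps, p.1 ≠ [])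
    {c : Char} {t : List Char} (h : pvTryFirst ps (c :: t) = none) :
    pvScanL ps (c :: t) = (c :: (pvScanL ps t).1, (pvScanL ps t).2) := by
  unfold pvScanL
  simp only [List.length_cons]
  rw [pvScanGo, h]

-- key interference lemmas ---------------------------------------------------------------
-- a prefix of a replaced string that is not a prefix of the original must reach a
-- replacement: it decomposes as (take j) ++ q with q prefix-comparable to n
theorem pvPrefix_repl {o n : List Char} :
    ∀ (N : Nat) (l p : List Char), l.length ≤ N → p <+: pvRepl o n l → ¬ p <+: l →
      ∃ j q, j < p.length ∧ j ≤ l.length ∧ p = l.take j ++ q ∧ q ≠ [] ∧ (q <+: n ∨ n <+: q) := by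
  intro N
  induction N with
  | zero =>
    intro l p hl hpre hnp
    have : l = [] := List.length_eq_zero_iff.mp (Nat.le_zero.mp hl)
    subst this
    rw [show pvRepl o n [] = [] from by rw [pvRepl]] at hpre
    exact absurd (List.prefix_nil.mp hpre ▸ List.nil_prefix) hnp
  | succ N ih =>
    intro l p hl hpre hnp
    match l with
    | [] =>
      rw [show pvRepl o n [] = [] from by rw [pvRepl]] at hpre
      exact absurd (List.prefix_nil.mp hpre ▸ List.nil_prefix) hnp
    | c :: t =>
      have hpne : p ≠ [] := fun hc => hnp (hc ▸ List.nil_prefix)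
      rw [pvRepl] at hpre
      by_cases h : o.isPrefixOf (c :: t) ∧ o ≠ []
      · rw [dif_pos h] at hpre
        exact ⟨0, p, List.length_pos_iff.mpr hpne, Nat.zero_le _, by simp, hpne,
          pvPrefix_append_cases hpre⟩
      · rw [dif_neg h] at hpre
        match p, hpne with
        | c' :: p', _ =>
          obtain ⟨rfl, hp'⟩ := List.cons_prefix_cons.mp hpre
          have hnp' : ¬ p' <+: t := fun hc => hnp (List.cons_prefix_cons.mpr ⟨rfl, hc⟩)
          obtain ⟨j, q, hj, hjl, hqeq, hqne, hrel⟩ :=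
            ih t p' (by simpa using Nat.lt_succ_iff.mp (Nat.lt_of_lt_of_le (Nat.lt_succ_self _) hl)) hp' hnp'
          exact ⟨j + 1, q, by simpa using hj, by simp; omega,
            by simp [List.take_succ_cons, hqeq], hqne, hrel⟩

-- scanning walks over a block no pattern can start in
theorem pvScan_passover {ps : List (List Char × List Char)} (hne : ∀ p ∈ ps, p.1 ≠ []) :
    ∀ (m : List Char),
      (∀ p ∈ ps, ∀ i, i < m.length → ¬ (m.drop i <+: p.1) ∧ ¬ (p.1 <+: m.drop i)) →
      ∀ z, pvScanL ps (m ++ z) = (m ++ (pvScanL ps z).1, (pvScanL ps z).2) := by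
  intro m
  induction m with
  | nil => intro _ z; simp
  | cons c m' ih =>
    intro hb z
    have htf : pvTryFirst ps (c :: (m' ++ z)) = none := by
      rw [pvTryFirst_none_iff]
      intro p hp hpre
      rcases pvPrefix_append_cases (b := c :: m') hpre with h1 | h1
      · exact (hb p hp 0 (by simp)).2 h1
      · exact (hb p hp 0 (by simp)).1 h1
    have hb' : ∀ p ∈ ps, ∀ i, i < m'.length → ¬ (m'.drop i <+: p.1) ∧ ¬ (p.1 <+: m'.drop i) := by
      intro p hp i hi
      have := hb p hp (i + 1) (by simp; omega)
      simpa using this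
    rw [show (c :: m') ++ z = c :: (m' ++ z) from rfl, pvScanL_skip hne htf, ih hb' z]
    simp

theorem pvRepl_skip {o n : List Char} :
    ∀ (m d : List Char), (∀ i, i < m.length → ¬ o <+: (m.drop i ++ d)) →
      pvRepl o n (m ++ d) = m ++ pvRepl o n d := by
  intro m
  induction m with
  | nil => intro d _; simp
  | cons c m' ih =>
    intro d hcond
    rw [show (c :: m') ++ d = c :: (m' ++ d) from rfl, pvRepl,
      dif_neg (fun hc => hcond 0 (by simp) (by
        simpa using (PySem.Chars.startswith_iff _ _).mp hc.1))]
    rw [ih d (fun i hi => by simpa using hcond (i + 1) (by simp; omega))]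
    rfl

theorem pvCnt_skip {o : List Char} :
    ∀ (m d : List Char), (∀ i, i < m.length → ¬ o <+: (m.drop i ++ d)) →
      pvCnt o (m ++ d) = pvCnt o d := by
  intro m
  induction m with
  | nil => intro d _; simp
  | cons c m' ih =>
    intro d hcond
    rw [show (c :: m') ++ d = c :: (m' ++ d) from rfl, pvCnt,
      dif_neg (fun hc => hcond 0 (by simp) (by
        simpa using (PySem.Chars.startswith_iff _ _).mp hc.1))]
    exact ih d (fun i hi => by simpa using hcond (i + 1) (by simp; omega))

-- once (o', n') is the first alternative matching o' ++ d, it is still the first matching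
-- o' ++ (d with o replaced by n)
theorem pvTryFirst_stable {o n : List Char} {rs : List (List Char × List Char)}
    (hok : pvHeadOK o n rs) {o' n' d : List Char} (ho' : o' ≠ [])
    (htf : pvTryFirst rs (o' ++ d) = some (o', n')) :
    pvTryFirst rs (o' ++ pvRepl o n d) = some (o', n') := by
  induction rs with
  | nil => cases htf
  | cons p rs' ih =>
    have hok' : pvHeadOK o n rs' :=
      ⟨hok.1, fun q hq => hok.2 q (List.mem_cons_of_mem _ hq)⟩
    by_cases hq : p.1.isPrefixOf (o' ++ d)
    · rcases p with ⟨po, pn⟩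
      rw [pvTryFirst, if_pos hq] at htf
      injection htf with htf
      rw [Prod.mk.injEq] at htf
      obtain ⟨rfl, rfl⟩ := htf
      have hself : po.isPrefixOf (po ++ pvRepl o n d) = true :=
        List.isPrefixOf_iff_prefix.mpr (List.prefix_append _ _)
      rw [pvTryFirst, if_pos hself]
    · rcases p with ⟨po, pn⟩
      rw [pvTryFirst, if_neg hq] at htf
      rw [pvTryFirst, if_neg ?_]
      · exact ih hok' htf
      · intro hpb
        have hpre : po <+: o' ++ pvRepl o n d := (PySem.Chars.startswith_iff _ _).mp hpb
        have hsep := (hok.2 (po, pn) List.mem_cons_self).2.1.2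
        rcases pvPrefix_append_cases hpre with h1 | h1
        · exact hq ((PySem.Chars.startswith_iff _ _).mpr
            (h1.trans (List.prefix_append o' d)))
        · -- o' <+: po
          have hpo : po = o' ++ po.drop o'.length := List.prefix_append_drop h1
          set r := po.drop o'.length with hrdef
          have hr : r <+: pvRepl o n d := by
            rw [hpo] at hpre
            exact (List.prefix_append_right_inj o').mp hpre
          have hnr : ¬ r <+: d := fun hc =>
            hq ((PySem.Chars.startswith_iff _ _).mpr
              (hpo ▸ (List.prefix_append_right_inj o').mpr hc))
          obtain ⟨j, q2, hj, hjl, hqeq, hqne, hrel⟩ :=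
            pvPrefix_repl d.length d r le_rfl hr hnr
          have hq2 : q2 = po.drop (o'.length + j) := by
            rw [hpo, hqeq, ← List.append_assoc]
            rw [List.drop_left' (by simp [List.length_take]; omega)]
          have hlen1 : 0 < o'.length + j := by
            have := List.length_pos_iff.mpr ho'; omega
          have hlen2 : o'.length + j < po.length := by
            have : po.length = o'.length + r.length := by
              rw [hpo]; simp
            omega
          have := hsep (o'.length + j) hlen2 hlen1
          rw [← hq2] at this
          rcases hrel with h2 | h2
          · exact this.1 h2
          · exact this.2 h2

-- THE key lemma: scanning with (o,n) first = replace (o→n) everywhere, then scan the rest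
theorem pvKey {o n : List Char} {rs : List (List Char × List Char)}
    (hok : pvHeadOK o n rs) (hch : pvChainOK rs) :
    ∀ l, pvScanL ((o, n) :: rs) l =
      ((pvScanL rs (pvRepl o n l)).1, pvCnt o l + (pvScanL rs (pvRepl o n l)).2) := by
  have ho : o ≠ [] := hok.1
  have hneRs : ∀ p ∈ rs, p.1 ≠ [] := fun p hp => (hok.2 p hp).1
  have hneFull : ∀ p ∈ (o, n) :: rs, p.1 ≠ [] := by
    intro p hp
    rcases List.mem_cons.mp hp with rfl | hp
    · exact ho
    · exact hneRs p hp
  suffices H : ∀ (N : Nat) (l : List Char), l.length ≤ N →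
      pvScanL ((o, n) :: rs) l =
        ((pvScanL rs (pvRepl o n l)).1, pvCnt o l + (pvScanL rs (pvRepl o n l)).2) by
    intro l; exact H l.length l le_rfl
  intro N
  induction N with
  | zero =>
    intro l hl
    have : l = [] := List.length_eq_zero_iff.mp (Nat.le_zero.mp hl)
    subst this
    rw [show pvRepl o n [] = [] from by rw [pvRepl], show pvCnt o [] = 0 from by rw [pvCnt]]
    rfl
  | succ N ihN =>
    intro l hl
    match l with
    | [] =>
      rw [show pvRepl o n [] = [] from by rw [pvRepl], show pvCnt o [] = 0 from by rw [pvCnt]]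
      rfl
    | c :: t =>
      by_cases hp : o.isPrefixOf (c :: t)
      · -- the head rename matches here
        have hpre : o <+: c :: t := (PySem.Chars.startswith_iff _ _).mp hp
        have holen : 0 < o.length := List.length_pos_iff.mpr ho
        have htf : pvTryFirst ((o, n) :: rs) (c :: t) = some (o, n) := by
          rw [pvTryFirst, if_pos hp]
        rw [pvScanL_match hneFull (List.cons_ne_nil c t) htf]
        have hdlen : ((c :: t).drop o.length).length ≤ N := by
          simp only [List.length_drop, List.length_cons]
          simp only [List.length_cons] at hl
          omega
        rw [ihN _ hdlen]
        have hrepl : pvRepl o n (c :: t) = n ++ pvRepl o n ((c :: t).drop o.length) := by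
          rw [pvRepl, dif_pos ⟨hp, ho⟩]
        have hcnt : pvCnt o (c :: t) = pvCnt o ((c :: t).drop o.length) + 1 := by
          rw [pvCnt, dif_pos ⟨hp, ho⟩]
        have hpass := pvScan_passover hneRs n
          (fun p hp2 i hi => ((hok.2 p hp2).2.1).1 i hi)
          (pvRepl o n ((c :: t).drop o.length))
        rw [hrepl, hcnt, hpass, Prod.mk.injEq]
        exact ⟨rfl, by omega⟩
      · cases htf2 : pvTryFirst rs (c :: t) with
        | none =>
          -- nothing matches here: copy one char on both sides
          have htfF : pvTryFirst ((o, n) :: rs) (c :: t) = none := by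
            rw [pvTryFirst, if_neg hp]; exact htf2
          rw [pvScanL_skip hneFull htfF]
          have hrepl : pvRepl o n (c :: t) = c :: pvRepl o n t := by
            rw [pvRepl, dif_neg (fun hc => hp hc.1)]
          have hcnt : pvCnt o (c :: t) = pvCnt o t := by
            rw [pvCnt, dif_neg (fun hc => hp hc.1)]
          have hnone2 : pvTryFirst rs (c :: pvRepl o n t) = none := by
            rw [pvTryFirst_none_iff]
            intro p hp2 hpre
            have hnp : ¬ p.1 <+: c :: t := (pvTryFirst_none_iff.mp htf2) p hp2
            match hp1 : p.1, hnp with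
            | [], hnp => exact hnp List.nil_prefix
            | c' :: p', hnp =>
              rw [hp1] at hpre
              obtain ⟨rfl, hp'⟩ := List.cons_prefix_cons.mp hpre
              have hnp' : ¬ p' <+: t := fun hc =>
                hnp (List.cons_prefix_cons.mpr ⟨rfl, hc⟩)
              obtain ⟨j, q, hj, hjl, hqeq, hqne, hrel⟩ :=
                pvPrefix_repl t.length t p' le_rfl hp' hnp'
              have hq : q = p.1.drop (j + 1) := by
                rw [hp1, hqeq, List.drop_succ_cons,
                  List.drop_left' (by simp [List.length_take]; omega)]
              have hlt : j + 1 < p.1.length := by rw [hp1]; simp; omega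
              have := ((hok.2 p hp2).2.1).2 (j + 1) hlt (Nat.succ_pos j)
              rw [← hq] at this
              rcases hrel with h2 | h2
              · exact this.1 h2
              · exact this.2 h2
          have htlen : t.length ≤ N := by simp only [List.length_cons] at hl; omega
          rw [ihN t htlen, hrepl, hcnt, pvScanL_skip hneRs hnone2]
        | some p =>
          rcases p with ⟨o', n'⟩
          have hmem := pvTryFirst_mem htf2
          have ho' : o' ≠ [] := (hneRs _ hmem.1)
          have hL : c :: t = o' ++ (c :: t).drop o'.length := List.prefix_append_drop hmem.2
          have htfF : pvTryFirst ((o, n) :: rs) (c :: t) = some (o', n') := by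
            rw [pvTryFirst, if_neg hp]; exact htf2
          rw [pvScanL_match hneFull (List.cons_ne_nil c t) htfF]
          have hdlen : ((c :: t).drop o'.length).length ≤ N := by
            have : 0 < o'.length := List.length_pos_iff.mpr ho'
            simp only [List.length_drop, List.length_cons]
            simp only [List.length_cons] at hl
            omega
          rw [ihN _ hdlen]
          have hcond : ∀ i, i < o'.length → ¬ o <+: (o'.drop i ++ (c :: t).drop o'.length) := by
            intro i hi hcontra
            rcases Nat.eq_zero_or_pos i with rfl | hipos
            · rw [List.drop_zero, ← hL] at hcontra
              exact hp ((PySem.Chars.startswith_iff _ _).mpr hcontra)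
            · have hps := (hok.2 _ hmem.1).2.2 i hi hipos
              rcases pvPrefix_append_cases hcontra with h1 | h1
              · exact hps.2 h1
              · exact hps.1 h1
          have hrepl : pvRepl o n (c :: t) = o' ++ pvRepl o n ((c :: t).drop o'.length) := by
            conv_lhs => rw [hL]
            exact pvRepl_skip _ _ hcond
          have hcnt : pvCnt o (c :: t) = pvCnt o ((c :: t).drop o'.length) := by
            conv_lhs => rw [hL]
            exact pvCnt_skip _ _ hcond
          have hstab : pvTryFirst rs (o' ++ pvRepl o n ((c :: t).drop o'.length)) = some (o', n') :=
            pvTryFirst_stable hok ho' (hL ▸ htf2)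
          rw [hrepl, hcnt]
          rw [pvScanL_match hneRs (by simp [ho']) hstab, List.drop_left]
          rw [Prod.mk.injEq]
          exact ⟨rfl, by omega⟩

theorem pvScanL_no_pats : ∀ l, pvScanL ([] : List (List Char × List Char)) l = (l, 0) := by
  intro l
  induction l with
  | nil => rfl
  | cons c t ih =>
    rw [pvScanL_skip (by intro p hp; cases hp) rfl, ih]

theorem pvSeq_eq_scan {ps : List (List Char × List Char)} (h : pvChainOK ps) :
    ∀ l, pvSeq ps l = pvScanL ps l := by
  induction ps with
  | nil => intro l; rw [pvSeq, pvScanL_no_pats]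
  | cons p rs ih =>
    rcases p with ⟨o, n⟩
    rcases pvChainOK_cons h with ⟨hok, hch⟩
    intro l
    rw [pvSeq, pvKey hok hch l, ih hch]

-- ===== VERDICT (by name: the statement is the Claim_ definition above) =====
theorem apply_simple_renames_py_spec : Claim_equal_apply_simple_renames_py := by
  intro text _
  unfold Spec_apply_simple_renames_py
  rw [apply_simple_renames_py, apply_simple_renames_py_alt,
    pvFoldlA pvRenames (by decide) text 0,
    show pvRenames.map (fun p => (p.1.toList, p.2.toList)) = pvPats from rfl,
    pvSeq_eq_scan pvChainOK_pats text.toList,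
    show pvScanGo pvPats text.toList.length text.toList = pvScanL pvPats text.toList from rfl]
  simp
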